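-- pv_equiv track=rewrite | github.com/litex-hub/litevideo | litevideo/csc/test/common.py | int2float
-- ===== SOURCE A (Python) =====
-- def int2float(x):
--     '''
--     Converts a 8 bit unsigned int to 16 bit half precision floating
--     point represntation.Expected input is in the range [0-255]
--     Output is an 16 bit integer whose bit representation correspond
--     to half precision float format.
--     The value of float output is in the range [0-1]
--     (higher precision in this range)
--     '''
--     if x==0:
--         return 0
--     else:
--         y = bin(x)[2:].zfill(8)     # Unpack in string
--         for i in range(len(y)):     # Leading one detector
--             if y[i] == '1':
--                 shift_val = i
--                 break
--
--         sign = '0'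
--         exp = 15 - 1 - shift_val
--         frac = y[shift_val+1:][::-1].zfill(10)[::-1]
--         x = sign+bin(exp)[2:].zfill(5)+frac     # Pack together in string
--         z = int(x, 2)                           # Convert string to correspondinf float
--         return z
-- ===== SOURCE B (Python) =====
-- def int2float(x):
--     '''
--     Converts an 8 bit unsigned int (0-255) to the bit pattern of a 16 bit
--     half precision float in [0, 1).
--     '''
--     if x == 0:
--         return 0
--     bl = x.bit_length()
--     exp = 6 + bl                              # biased exponent 14 - (8 - bl)
--     frac = (x - (1 << (bl - 1))) << (11 - bl) # mantissa, left-aligned in 10 bits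
--     return (exp << 10) + frac
-- ===== Notes on version B (the rewrite author's own statement) =====
-- stated objective: simpler
-- what changed: Replaces A's bit-string unpacking (bin/zfill), leading-one-detector loop and string re-packing/int(s,2) reparse by closed-form bit_length and shift arithmetic; Pre_ restricts to the documented eight-bit unsigned domain, outside which A's zero-fill/string-slicing packing yields accidental bit patterns (for negative x the character 'b' from bin() even enters the unpacked string).
-- outside the precondition, e.g. on int2float(256): A returns 14336, B returns 15360; on int2float(-1): A returns 7168, B returns 5120
import Mathlib
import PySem

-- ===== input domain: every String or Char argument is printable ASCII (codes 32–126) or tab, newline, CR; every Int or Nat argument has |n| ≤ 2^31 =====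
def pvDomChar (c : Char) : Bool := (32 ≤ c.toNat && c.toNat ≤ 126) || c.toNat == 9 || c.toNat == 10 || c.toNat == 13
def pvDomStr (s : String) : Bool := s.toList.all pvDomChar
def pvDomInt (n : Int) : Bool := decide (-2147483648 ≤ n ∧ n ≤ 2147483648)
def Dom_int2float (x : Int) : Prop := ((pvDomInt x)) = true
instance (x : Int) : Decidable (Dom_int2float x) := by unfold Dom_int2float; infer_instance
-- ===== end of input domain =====

-- B replaces A's bit-string unpacking / leading-one-detector loop / string re-packing by
-- closed-form bit-length and shift arithmetic (objective: simpler), on the documented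
-- eight-bit unsigned input domain stated by Pre_.


-- ===== PORT A =====
-- 'for i in range(len(y)): if y[i] == "1": shift_val = i; break' — the leading-one detector:
-- first index holding '1' (if no '1' existed, Python's shift_val would stay unbound, a
-- NameError; that case is unreachable: y always contains the binary digits of |x| ≠ 0).
def pvFindOne : List Char → Nat → Nat
  | [], i => i
  | c :: cs, i => if c = '1' then i else pvFindOne cs (i + 1)

-- int(s, 2): the exact primitive is PySem.Int.ofCharsBase?, but its digit accumulator is
-- private to the prelude, so the base-2 digit fold is written out step for step; exact here
-- because the packed string is nonempty and holds only '0'/'1' characters (no sign,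
-- whitespace, underscore or base prefix, so none of int()'s other rules can fire).
def pvParseBin2Acc (a : Nat) (cs : List Char) : Nat :=
  cs.foldl (fun a c => 2 * a + (if c = '1' then 1 else 0)) a

def int2float (x : Int) : Int :=
  if x = 0 then 0
  else
    -- y = bin(x)[2:].zfill(8)
    let y := PySem.Chars.zfill (PySem.List.slice (PySem.Int.toBinChars0b x) (some 2) none) 8
    let shift_val := pvFindOne y 0
    let exp : Int := 15 - 1 - (shift_val : Int)
    -- frac = y[shift_val+1:][::-1].zfill(10)[::-1]   ([::-1] is reverse)
    let frac := (PySem.Chars.zfill (PySem.List.slice y (some ((shift_val : Int) + 1)) none).reverse 10).reverse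
    -- x = sign + bin(exp)[2:].zfill(5) + frac ;  z = int(x, 2)
    let xs := '0' :: (PySem.Chars.zfill (PySem.List.slice (PySem.Int.toBinChars0b exp) (some 2) none) 5 ++ frac)
    (pvParseBin2Acc 0 xs : Int)

-- ===== PORT B =====
def int2float_alt (x : Int) : Int :=
  if x = 0 then 0
  else
    let bl : Nat := PySem.Int.bitLength x
    let exp : Int := 6 + (bl : Int)
    let frac : Int := (x - ((1 : Int) <<< (bl - 1))) <<< (11 - bl)
    (exp <<< (10 : Nat)) + frac

-- ===== PRECONDITION & SPEC =====
-- Pre_ is the function's documented domain, eight-bit unsigned ints: outside it A still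
-- returns, but its values are artefacts of the zero-fill/string-slicing packing (for
-- negative x the 'b' of bin() even lands inside the unpacked string), so they are excluded.
def Pre_int2float (x : Int) : Prop := 0 ≤ x ∧ x ≤ 255
instance (x : Int) : Decidable (Pre_int2float x) := by unfold Pre_int2float; infer_instance
def pvWitness_int2float : Int := (7)
def Spec_int2float (x : Int) (out : Int) : Prop := out = int2float_alt x
instance (x : Int) (out : Int) : Decidable (Spec_int2float x out) := by unfold Spec_int2float; infer_instance

-- ===== CLAIM (what is proved, stated in full; the proofs are below) =====
def Claim_equal_int2float : Prop := ∀ (x : Int), Dom_int2float x → Pre_int2float x → Spec_int2float x (int2float x)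

-- ===== LEMMAS AND PROOFS =====

theorem pvParse_cons (a : Nat) (c : Char) (cs : List Char) :
    pvParseBin2Acc a (c :: cs) = pvParseBin2Acc (2 * a + (if c = '1' then 1 else 0)) cs := rfl

theorem pvParse_append (a : Nat) (l₁ l₂ : List Char) :
    pvParseBin2Acc a (l₁ ++ l₂) = pvParseBin2Acc (pvParseBin2Acc a l₁) l₂ := by
  simp [pvParseBin2Acc, List.foldl_append]

theorem pvParse_acc (cs : List Char) : ∀ a, pvParseBin2Acc a cs = a * 2 ^ cs.length + pvParseBin2Acc 0 cs := by
  induction cs with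
  | nil => simp [pvParseBin2Acc]
  | cons c t ih =>
    intro a
    rw [pvParse_cons, pvParse_cons, ih, ih (2 * 0 + _)]
    simp only [List.length_cons, pow_succ]
    ring

theorem pvParse_replicate (k : Nat) : ∀ a, pvParseBin2Acc a (List.replicate k '0') = a * 2 ^ k := by
  induction k with
  | zero => simp [pvParseBin2Acc]
  | succ k ih =>
    intro a
    rw [List.replicate_succ, pvParse_cons, ih]
    simp [pow_succ]
    ring

theorem pvParse_rep_prefix (k : Nat) (l : List Char) :
    pvParseBin2Acc 0 (List.replicate k '0' ++ l) = pvParseBin2Acc 0 l := by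
  rw [pvParse_append, pvParse_replicate]
  simp

theorem pvParse_rep_suffix (k : Nat) (l : List Char) :
    pvParseBin2Acc 0 (l ++ List.replicate k '0') = pvParseBin2Acc 0 l * 2 ^ k := by
  rw [pvParse_append, pvParse_replicate]

-- the three facts about the digit string Nat.toDigits 2 n that the proof needs
theorem pvToDigits2_parse : ∀ n, pvParseBin2Acc 0 (Nat.toDigits 2 n) = n := by
  intro n
  induction n using Nat.strong_induction_on with
  | _ n ih =>
    rw [Nat.toDigits_eq_if (by omega)]
    by_cases h : n < 2
    · interval_cases n <;> decide
    · simp only [if_neg h]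
      rw [pvParse_append, ih (n / 2) (by omega)]
      rcases Nat.mod_two_eq_zero_or_one n with h2 | h2 <;>
        simp [h2, pvParseBin2Acc, Nat.digitChar] <;> omega

theorem pvToDigits2_length : ∀ n, 0 < n → (Nat.toDigits 2 n).length = PySem.Int.bitLength (n : Int) := by
  intro n
  induction n using Nat.strong_induction_on with
  | _ n ih =>
    intro hn
    rw [Nat.toDigits_eq_if (by omega), PySem.Int.bitLength_natCast hn]
    by_cases h : n < 2
    · have : n = 1 := by omega
      subst this
      decide
    · simp only [if_neg h, List.length_append, List.length_cons, List.length_nil]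
      rw [ih (n / 2) (by omega) (by omega)]

theorem pvToDigits2_head : ∀ n, 0 < n → ∃ t, Nat.toDigits 2 n = '1' :: t := by
  intro n
  induction n using Nat.strong_induction_on with
  | _ n ih =>
    intro hn
    rw [Nat.toDigits_eq_if (by omega)]
    by_cases h : n < 2
    · have : n = 1 := by omega
      subst this
      exact ⟨[], by decide⟩
    · obtain ⟨t, ht⟩ := ih (n / 2) (by omega) (by omega)
      simp only [if_neg h, ht]
      exact ⟨t ++ [(n % 2).digitChar], rfl⟩

theorem pvFindOne_rep (k : Nat) (l : List Char) :
    ∀ i, pvFindOne (List.replicate k '0' ++ l) i = pvFindOne l (i + k) := by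
  induction k with
  | zero => simp
  | succ k ih =>
    intro i
    rw [List.replicate_succ, List.cons_append]
    simp only [pvFindOne]
    rw [if_neg (by decide), ih]
    congr 1
    omega

theorem pvZfill_eq (cs : List Char) (w : Int)
    (h : ∀ c, cs.head? = some c → ¬(c = '+' ∨ c = '-')) :
    PySem.Chars.zfill cs w = List.replicate (w.toNat - cs.length) '0' ++ cs := by
  cases cs with
  | nil =>
    unfold PySem.Chars.zfill
    split
    · next hle =>
      have : w.toNat = 0 := by simp at hle; omega
      simp [this]
    · simp
  | cons c rest =>
    have hc := h c rfl
    unfold PySem.Chars.zfill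
    split
    · next hle =>
      simp only [List.length_cons] at hle ⊢
      have : w.toNat - (rest.length + 1) = 0 := by omega
      simp [this]
    · next hle =>
      change (if c = '+' ∨ c = '-' then c :: (List.replicate (w.toNat - (c :: rest).length) '0' ++ rest)
        else List.replicate (w.toNat - (c :: rest).length) '0' ++ c :: rest) = _
      rw [if_neg hc]

-- digits produced by Nat.toDigits 2 are never sign characters
theorem pvToDigits2_no_sign (n : Nat) (c : Char) (hc : c ∈ Nat.toDigits 2 n) : ¬(c = '+' ∨ c = '-') := by
  have := Nat.isDigit_of_mem_toDigits (b := 2) (by omega) (by omega) hc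
  rintro (rfl | rfl) <;> simp [Char.isDigit] at this

-- the unpacked string bin(x)[2:] for x ≥ 0: the binary digits of x
theorem pvSliceBin (x : Int) (hx : 0 ≤ x) :
    PySem.List.slice (PySem.Int.toBinChars0b x) (some 2) none = Nat.toDigits 2 x.toNat := by
  unfold PySem.Int.toBinChars0b
  rw [if_neg (by omega)]
  simp [pysem]

theorem pvDropHelper (k : Nat) (t : List Char) :
    PySem.List.slice (List.replicate k '0' ++ '1' :: t) (some ((k : Nat) + 1)) none = t := by
  have h1 : ((k : Nat) : Int) + 1 = ((k + 1 : Nat) : Int) := by push_cast; ring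
  rw [h1, PySem.List.slice_from_natCast]
  have h2 : List.replicate k '0' ++ '1' :: t = (List.replicate k '0' ++ ['1']) ++ t := by simp
  rw [h2]
  have h3 : (List.replicate k '0' ++ ['1']).length = k + 1 := by simp
  exact h3 ▸ List.drop_left

-- ===== VERDICT (by name: the statement is the Claim_ definition above) =====
theorem int2float_spec : Claim_equal_int2float := by
  intro x _hdom hpre
  obtain ⟨hx0, hx255⟩ := hpre
  unfold Spec_int2float
  by_cases hx : x = 0
  · simp [hx, int2float, int2float_alt]
  · simp only [int2float, int2float_alt, if_neg hx]
    set m : Nat := x.toNat with hm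
    have hxm : x = (m : Int) := by omega
    have hm0 : 0 < m := by omega
    have hm255 : m ≤ 255 := by omega
    obtain ⟨t, ht⟩ := pvToDigits2_head m hm0
    have hblm : PySem.Int.bitLength x = PySem.Int.bitLength (m : Int) := by rw [hxm]
    set bl : Nat := PySem.Int.bitLength (m : Int) with hbl
    have hlen : (Nat.toDigits 2 m).length = bl := pvToDigits2_length m hm0
    have htlen : t.length = bl - 1 := by
      rw [ht] at hlen; simp at hlen; omega
    have hbl1 : 1 ≤ bl := by
      rw [ht] at hlen; simp at hlen; omega
    have hparse_m := pvToDigits2_parse m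
    rw [ht, pvParse_cons, pvParse_acc, htlen] at hparse_m
    have hparse_t : pvParseBin2Acc 0 t = m - 2 ^ (bl - 1) := by
      simp at hparse_m; omega
    have hrem_le : 2 ^ (bl - 1) ≤ m := by
      simp at hparse_m; omega
    have hbl8 : bl ≤ 8 := by
      -- 2^(bl-1) ≤ m ≤ 255 forces bl ≤ 8
      by_contra hgt
      have : 2 ^ 8 ≤ 2 ^ (bl - 1) := Nat.pow_le_pow_right (by norm_num) (by omega)
      omega
    -- the zero-filled unpacked string y
    have hy : PySem.Chars.zfill (PySem.List.slice (PySem.Int.toBinChars0b x) (some 2) none) 8 =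
        List.replicate (8 - bl) '0' ++ '1' :: t := by
      rw [pvSliceBin x hx0, ← hm, ht, pvZfill_eq]
      · congr 2
        simp
        omega
      · intro c hc
        simp at hc
        subst hc; decide
    rw [hy]
    set k : Nat := 8 - bl with hk
    -- the leading-one position
    have hsv : pvFindOne (List.replicate k '0' ++ '1' :: t) 0 = k := by
      rw [pvFindOne_rep]
      simp [pvFindOne]
    rw [hsv]
    -- the mantissa slice y[shift_val+1:]
    rw [pvDropHelper k t]
    -- the exponent string bin(exp)[2:].zfill(5)
    set eN : Nat := 14 - k with heN
    have he : (15 - 1 - ((k : Nat) : Int)) = (eN : Int) := by push_cast; omega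
    have heN0 : 0 < eN := by omega
    rw [he]
    obtain ⟨u, hu⟩ := pvToDigits2_head eN heN0
    have hebin : PySem.List.slice (PySem.Int.toBinChars0b (eN : Int)) (some 2) none = '1' :: u := by
      rw [pvSliceBin _ (by positivity)]
      simp [hu]
    rw [hebin]
    have hezf : PySem.Chars.zfill ('1' :: u) 5 = List.replicate ((5:Int).toNat - ('1'::u).length) '0' ++ ('1' :: u) := by
      apply pvZfill_eq
      intro c hc
      simp at hc
      subst hc; decide
    rw [hezf]
    -- the mantissa string frac = t right-padded with zeros to ≥ 10 bits
    have hfr : (PySem.Chars.zfill t.reverse 10).reverse = t ++ List.replicate ((10:Int).toNat - t.length) '0' := by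
      rw [pvZfill_eq]
      · simp [List.reverse_append]
      · intro c hc
        have hct : c ∈ t := List.mem_reverse.mp (List.mem_of_mem_head? hc)
        exact pvToDigits2_no_sign m c (ht ▸ List.mem_cons_of_mem _ hct)
    rw [hfr]
    -- evaluate the final int(…, 2)
    rw [pvParse_cons]
    have h0 : (2 * 0 + (if ('0':Char) = '1' then 1 else 0)) = 0 := by decide
    rw [h0, List.append_assoc, pvParse_rep_prefix, pvParse_append, ← hu, pvToDigits2_parse,
      pvParse_acc, pvParse_rep_suffix, hparse_t]
    -- both sides are now closed arithmetic in m and bl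
    have hW : (t ++ List.replicate ((10:Int).toNat - t.length) '0').length = 10 := by
      simp
      omega
    rw [hW, hblm]
    -- B's side: evaluate the Int shifts
    rw [Int.shiftLeft_eq, Int.shiftLeft_eq, Int.shiftLeft_eq]
    have hsub : ((m - 2 ^ (bl - 1) : Nat) : Int) = (m : Int) - 2 ^ (bl - 1) := by
      push_cast [Nat.cast_sub hrem_le]
      ring
    have h10t : (10:Int).toNat - t.length = 11 - bl := by omega
    have heq : ((eN : Int)) = 6 + (bl : Int) := by omega
    rw [h10t, hxm]
    push_cast [hsub, heq]
    ring
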